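-- pv_equiv track=rewrite | github.com/httppsdouq29/TT_ATTT | bai13.py | sum_prime
-- ===== SOURCE A (Python) =====
-- import math
--
-- def is_prime(a):
--     if a <= 1:
--         return False
--     for i in range(2, int(math.sqrt(a)) + 1):
--         if a % i == 0:
--             return False
--     return True
--
-- def day_prime(n):
--     k = []
--     for i in range(2, n + 1):  # Bao gồm cả n
--         if is_prime(i):
--             k.append(i)
--     return k
--
-- def sum_prime(n):
--     a = day_prime(n)
--     k = []
--     for i in range(len(a)):
--         for j in range(i + 1, len(a)):
--             p1 = a[i]
--             p2 = a[j]
--             if is_prime(p1 + p2) and is_prime(abs(p1 - p2)):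
--                 k.append((p1, p2))
--     return k
-- ===== SOURCE B (Python) =====
-- def _pr(m):
--     # trial division by 2 then odd divisors only
--     if m < 2:
--         return False
--     if m % 2 == 0:
--         return m == 2
--     d = 3
--     while d * d <= m:
--         if m % d == 0:
--             return False
--         d += 2
--     return True
--
--
-- def sum_prime(n):
--     # Any pair of odd primes has an even sum > 2, so only pairs (2, p) with
--     # p - 2 and p + 2 both prime can qualify; scan odd p from 5 to n.
--     res = []
--     p = 5
--     while p <= n:
--         if _pr(p) and _pr(p - 2) and _pr(p + 2):
--             res.append((2, p))
--         p += 2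
--     return res
-- ===== Notes on version B (the rewrite author's own statement) =====
-- stated objective: faster
-- what changed: Instead of enumerating all pairs of primes up to n and primality-testing each sum and difference, B uses the fact that two odd primes have an even sum exceeding the only even prime, so only pairs whose smaller member is the even prime can qualify: it scans the odd candidates p once, emitting a pair exactly when p and its two odd neighbours are all prime, with an odd-divisor trial test.
import Mathlib
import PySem

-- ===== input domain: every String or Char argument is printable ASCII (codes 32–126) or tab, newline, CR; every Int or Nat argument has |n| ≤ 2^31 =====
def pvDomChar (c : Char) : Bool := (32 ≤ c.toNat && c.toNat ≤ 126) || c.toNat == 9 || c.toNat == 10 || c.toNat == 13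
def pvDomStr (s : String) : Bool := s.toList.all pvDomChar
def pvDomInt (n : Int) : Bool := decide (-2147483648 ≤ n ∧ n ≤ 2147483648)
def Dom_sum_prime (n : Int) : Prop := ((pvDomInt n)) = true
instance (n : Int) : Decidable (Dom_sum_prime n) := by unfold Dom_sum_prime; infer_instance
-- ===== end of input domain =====

-- B replaces A's all-pairs scan over the prime list by a single scan of odd p in [5, n]
-- emitting (2, p) when p - 2, p, p + 2 are all prime (two odd primes have an even sum > 2);
-- a timing run measures this as faster.

-- ===== PORT A =====
-- int(math.sqrt(a)) agrees with Nat.sqrt exactly for the arguments reached here (|a| ≤ 2^33).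
def is_prime_A (a : Int) : Bool :=
  if a ≤ 1 then false
  else (PySem.List.pyRange 2 ((a.toNat.sqrt : Int) + 1) 1).all (fun i => !(PySem.Int.mod a i == 0))

def day_prime_A (n : Int) : List Int :=
  (PySem.List.pyRange 2 (n + 1) 1).foldl (fun k i => if is_prime_A i then k ++ [i] else k) []

def sum_prime (n : Int) : List (Int × Int) :=
  let a := day_prime_A n
  (PySem.List.pyRange 0 (a.length : Int) 1).foldl (fun k i =>
    (PySem.List.pyRange (i + 1) (a.length : Int) 1).foldl (fun k j =>
      let p1 := PySem.List.pyGetD a i 0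
      let p2 := PySem.List.pyGetD a j 0
      if is_prime_A (p1 + p2) && is_prime_A |p1 - p2| then k ++ [(p1, p2)] else k) k) []

-- ===== PORT B =====
-- the Nat fuel argument of trial_odd_go / alt_go is only a structural-termination guard:
-- it starts at the loop's measure and never runs out on the branch that recurses.
def trial_odd_go : Nat → Int → Int → Bool
  | 0, _, _ => true
  | fuel + 1, m, d =>
    if d * d ≤ m then
      (if PySem.Int.mod m d == 0 then false else trial_odd_go fuel m (d + 2))
    else true

def trial_odd (m d : Int) : Bool := trial_odd_go (m + 3 - d).toNat m d

def is_prime_B (m : Int) : Bool :=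
  if m < 2 then false
  else if PySem.Int.mod m 2 == 0 then m == 2
  else trial_odd m 3

def alt_go : Nat → Int → Int → List (Int × Int) → List (Int × Int)
  | 0, _, _, res => res
  | fuel + 1, n, p, res =>
    if p ≤ n then
      alt_go fuel n (p + 2)
        (if is_prime_B p && is_prime_B (p - 2) && is_prime_B (p + 2) then res ++ [(2, p)] else res)
    else res

def sum_prime_alt (n : Int) : List (Int × Int) := alt_go (n + 1 - 5).toNat n 5 []

-- ===== PRECONDITION & SPEC =====
def Spec_sum_prime (n : Int) (out : List (Int × Int)) : Prop := out = sum_prime_alt n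
instance (n : Int) (out : List (Int × Int)) : Decidable (Spec_sum_prime n out) := by unfold Spec_sum_prime; infer_instance

-- ===== CLAIM (what is proved, stated in full; the proofs are below) =====
def Claim_equal_sum_prime : Prop := ∀ (n : Int), Dom_sum_prime n → Spec_sum_prime n (sum_prime n)

-- ===== LEMMAS AND PROOFS =====

def prB (x : Int) : Bool := decide (2 ≤ x ∧ Nat.Prime x.toNat)

def G (x : Int) : Bool := prB x && prB (x - 2) && prB (x + 2)

def NF (n : Int) : List (Int × Int) :=
  ((PySem.List.pyRange 5 (n + 1) 1).filter G).map (fun q => (2, q))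

lemma is_prime_A_eq (a : Int) : is_prime_A a = prB a := by
  unfold is_prime_A prB
  by_cases h : a ≤ 1
  · simp [h]
  · simp only [if_neg h]
    have ha : (a.toNat : Int) = a := by omega
    rw [Bool.eq_iff_iff]
    simp only [List.all_eq_true, PySem.List.mem_pyRange_one, decide_eq_true_eq,
      Bool.not_eq_eq_eq_not, Bool.not_true, beq_eq_false_iff_ne]
    constructor
    · intro hall
      refine ⟨by omega, ?_⟩
      rw [Nat.prime_def_le_sqrt]
      refine ⟨by omega, ?_⟩
      intro m hm2 hms hdvd
      have h1 : (m : Int) ∣ a := by rw [← ha]; exact_mod_cast hdvd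
      have h2 := hall (m : Int) ⟨by exact_mod_cast hm2, by omega⟩
      rw [Ne, PySem.Int.mod_eq_zero_iff_dvd] at h2
      exact h2 h1
    · rintro ⟨-, hp⟩ i ⟨hi2, his⟩
      rw [Ne, PySem.Int.mod_eq_zero_iff_dvd]
      intro hdvd
      rw [Nat.prime_def_le_sqrt] at hp
      refine hp.2 i.toNat (by omega) (by omega) ?_
      have h3 : (i.toNat : Int) ∣ (a.toNat : Int) := by
        rw [ha]; rwa [(by omega : (i.toNat : Int) = i)]
      exact_mod_cast h3

lemma trial_odd_go_eq_false_of (fuel : Nat) : ∀ (m d e : Int), (m + 3 - d).toNat ≤ fuel →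
    3 ≤ d → d % 2 = 1 → e % 2 = 1 → d ≤ e → e * e ≤ m → e ∣ m →
    trial_odd_go fuel m d = false := by
  induction fuel with
  | zero =>
      intro m d e hf h3 hd he hde hee hdvd
      exfalso
      have h1 : 3 * e ≤ e * e := mul_le_mul (by omega) le_rfl (by omega) (by omega)
      omega
  | succ fuel ih =>
      intro m d e hf h3 hd he hde hee hdvd
      rw [trial_odd_go]
      have hdd : d * d ≤ e * e := mul_le_mul hde hde (by omega) (by omega)
      rw [if_pos (by omega)]
      by_cases hmod : (PySem.Int.mod m d == 0) = true
      · rw [if_pos hmod]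
      · rw [if_neg hmod]
        simp only [beq_iff_eq, PySem.Int.mod_eq_zero_iff_dvd] at hmod
        refine ih m (d + 2) e (by omega) (by omega) (by omega) he ?_ hee hdvd
        rcases (by omega : d = e ∨ d + 2 ≤ e) with rfl | h2
        · exact absurd hdvd hmod
        · exact h2

lemma trial_odd_eq_false_of (m d e : Int) (h3 : 3 ≤ d) (hd : d % 2 = 1) (he : e % 2 = 1)
    (hde : d ≤ e) (hee : e * e ≤ m) (hdvd : e ∣ m) : trial_odd m d = false :=
  trial_odd_go_eq_false_of _ m d e le_rfl h3 hd he hde hee hdvd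

lemma trial_odd_go_eq_true_of (fuel : Nat) : ∀ (m d : Int),
    (∀ e : Int, d ≤ e → e * e ≤ m → ¬ e ∣ m) → trial_odd_go fuel m d = true := by
  induction fuel with
  | zero => intro m d h; rfl
  | succ fuel ih =>
      intro m d h
      rw [trial_odd_go]
      by_cases hle : d * d ≤ m
      · rw [if_pos hle]
        have hmod : ¬ (PySem.Int.mod m d == 0) = true := by
          simp only [beq_iff_eq, PySem.Int.mod_eq_zero_iff_dvd]
          exact h d le_rfl hle
        rw [if_neg hmod]
        exact ih m (d + 2) (fun e h1 h2 => h e (by omega) h2)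
      · rw [if_neg hle]

lemma trial_odd_eq_true_of (m d : Int) (h : ∀ e : Int, d ≤ e → e * e ≤ m → ¬ e ∣ m) :
    trial_odd m d = true :=
  trial_odd_go_eq_true_of _ m d h

lemma is_prime_B_eq (m : Int) : is_prime_B m = prB m := by
  unfold is_prime_B prB
  by_cases h2 : m < 2
  · simp [h2]
  · rw [if_neg h2]
    have hm : (m.toNat : Int) = m := by omega
    have hmod2 : PySem.Int.mod m 2 = m % 2 := PySem.Int.mod_eq_emod_of_pos (by norm_num : (0:Int) < 2)
    by_cases hev : m % 2 = 0
    · rw [if_pos (by simp [hev])]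
      rcases (by omega : m = 2 ∨ 2 < m) with rfl | hgt
      · simp; decide
      · have : ¬ Nat.Prime m.toNat := by
          intro hp
          have h2d : 2 ∣ m.toNat := by omega
          rcases (Nat.Prime.eq_one_or_self_of_dvd hp 2 h2d) with h | h <;> omega
        have hne : (m == 2) = false := by simp; omega
        simp [this, hne]
    · rw [if_neg (by simp [hev])]
      by_cases hp : Nat.Prime m.toNat
      · rw [trial_odd_eq_true_of m 3 ?_]
        · simp [hp]; omega
        · intro e he3 hee hdvd
          have h1 : e.toNat ∣ m.toNat := by
            have : (e.toNat : Int) ∣ (m.toNat : Int) := by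
              rw [hm, (by omega : (e.toNat : Int) = e)]; exact hdvd
            exact_mod_cast this
          rcases Nat.Prime.eq_one_or_self_of_dvd hp e.toNat h1 with h | h
          · omega
          · have : e = m := by omega
            subst this
            nlinarith
      · have h3 : 3 ≤ m := by omega
        set k := m.toNat.minFac with hk
        have hkp : Nat.Prime k := Nat.minFac_prime (by omega)
        have hkdvd : k ∣ m.toNat := Nat.minFac_dvd _
        have hk2 : k ≠ 2 := by
          intro h
          have hd2 : (2:Nat) ∣ m.toNat := h ▸ hkdvd
          omega
        have hkodd : k % 2 = 1 := by
          rcases Nat.even_or_odd k with he | ho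
          · obtain ⟨t, ht⟩ := he
            have : (2:Nat) ∣ k := ⟨t, by omega⟩
            rcases Nat.Prime.eq_one_or_self_of_dvd hkp 2 this with h | h
            · omega
            · exact absurd h.symm hk2
          · obtain ⟨t, ht⟩ := ho
            omega
        have hksq : k * k ≤ m.toNat := by
          have := Nat.minFac_sq_le_self (by omega : 0 < m.toNat) hp
          rwa [pow_two] at this
        have hk3 : 3 ≤ k := by
          have := hkp.two_le
          omega
        have h5 : trial_odd m 3 = false := by
          refine trial_odd_eq_false_of m 3 (k : Int) le_rfl (by decide) (by omega) (by omega)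
            (by rw [← hm]; exact_mod_cast hksq) ?_
          have : (k : Int) ∣ (m.toNat : Int) := by exact_mod_cast hkdvd
          rwa [hm] at this
        rw [h5]
        simp [hp]


lemma is_prime_A_fun : is_prime_A = prB := funext is_prime_A_eq

lemma prB_even_false (x : Int) (h1 : x % 2 = 0) (h2 : 2 < x) : prB x = false := by
  have : ¬ Nat.Prime x.toNat := by
    intro hp
    have h2d : (2:Nat) ∣ x.toNat := by omega
    rcases Nat.Prime.eq_one_or_self_of_dvd hp 2 h2d with h | h <;> omega
  simp [prB, this]

lemma mem_prB_filter_odd (l : List Int) (x : Int)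
    (hx : x ∈ l.filter prB) (h3 : ∀ y ∈ l, 3 ≤ y) : 3 ≤ x ∧ x % 2 = 1 := by
  rw [List.mem_filter] at hx
  obtain ⟨hmem, hpb⟩ := hx
  have hx3 := h3 x hmem
  refine ⟨hx3, ?_⟩
  simp only [prB, decide_eq_true_eq] at hpb
  rcases (by omega : x % 2 = 0 ∨ x % 2 = 1) with h | h
  · exfalso
    have := prB_even_false x h (by omega)
    simp [prB, hpb.2] at this
    omega
  · exact h

lemma day_prime_eq (n : Int) :
    day_prime_A n = (PySem.List.pyRange 2 (n + 1) 1).filter prB := by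
  unfold day_prime_A
  rw [PySem.List.foldl_append_if_eq_filter, is_prime_A_fun]
  rfl

lemma filter_G_35 (n : Int) :
    (PySem.List.pyRange 3 (n + 1) 1).filter G = (PySem.List.pyRange 5 (n + 1) 1).filter G := by
  by_cases h : 5 ≤ n + 1
  · rw [PySem.List.pyRange_one_append 3 5 (n+1) (by omega) h, List.filter_append]
    have : PySem.List.pyRange 3 5 1 = [3, 4] := by decide
    rw [this]
    have : [(3:Int), 4].filter G = [] := by decide
    rw [this, List.nil_append]
  · rw [PySem.List.pyRange_one_eq_nil (a := 5) (b := n+1) (by omega)]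
    rcases (by omega : n + 1 ≤ 3 ∨ n + 1 = 4 ∨ n + 1 = 5) with h1 | h1 | h1
    · rw [PySem.List.pyRange_one_eq_nil (by omega)]
    · rw [h1]
      decide
    · rw [h1]
      decide

lemma foldl_nested {α : Type} (l : List Int) (R : Int → List Int)
    (C : Int → Int → Bool) (F : Int → Int → α) (init : List α) :
    l.foldl (fun k i => (R i).foldl (fun k j => if C i j then k ++ [F i j] else k) k) init
      = init ++ l.flatMap (fun i => ((R i).filter (C i)).map (F i)) := by
  refine (PySem.List.foldl_congr_mem l _ (fun k i => k ++ ((R i).filter (C i)).map (F i)) init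
    (fun acc i _ => PySem.List.foldl_append_if _ _ _ _)).trans ?_
  apply PySem.List.foldl_append_eq_flatMap

lemma map_filter_map {α β : Type} (f : Int → β) (q : β → Bool) (F : β → α) (l : List Int) :
    (l.filter (fun j => q (f j))).map (fun j => F (f j)) = ((l.map f).filter q).map F := by
  induction l with
  | nil => rfl
  | cons x xs ih =>
      by_cases hq : q (f x) <;> simp [hq, ih]

lemma sum_prime_eq_NF (n : Int) : sum_prime n = NF n := by
  unfold sum_prime
  rw [day_prime_eq]
  set a := (PySem.List.pyRange 2 (n + 1) 1).filter prB with ha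
  simp only []
  rw [foldl_nested, List.nil_append]
  rcases lt_or_ge n 2 with h2 | h2
  · have ha0 : a = [] := by
      rw [ha, PySem.List.pyRange_one_eq_nil (by omega), List.filter_nil]
    rw [ha0]
    simp only [List.length_nil, Nat.cast_zero]
    rw [PySem.List.pyRange_one_eq_nil (by omega)]
    rw [NF, PySem.List.pyRange_one_eq_nil (by omega)]
    rfl
  · have hcons : a = 2 :: (PySem.List.pyRange 3 (n + 1) 1).filter prB := by
      rw [ha, PySem.List.pyRange_one_cons (by omega : (2:Int) < n + 1), List.filter_cons,
        (show prB 2 = true by decide)]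
      simp
    set t := (PySem.List.pyRange 3 (n + 1) 1).filter prB with htdef
    have hlen : (a.length : Int) = (t.length : Int) + 1 := by rw [hcons]; simp
    have hlen1 : 1 ≤ (a.length : Int) := by omega
    have hget0 : PySem.List.pyGetD a 0 0 = 2 := by
      rw [PySem.List.pyGetD_eq_getElem _ _ (by omega) (by omega)]
      simp [hcons]
    have hgett : ∀ i : Int, 1 ≤ i → i < (a.length : Int) → PySem.List.pyGetD a i 0 ∈ t := by
      intro i h1 hl
      rw [PySem.List.pyGetD_eq_getElem _ _ (by omega) (by omega)]
      have hi : i.toNat = (i.toNat - 1) + 1 := by omega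
      have h5 : a[i.toNat]? = t[i.toNat - 1]? := by
        rw [hcons, hi]
        exact List.getElem?_cons_succ
      have h6 : a[i.toNat]? = some (a[i.toNat]'(by omega)) :=
        List.getElem?_eq_getElem _
      rw [h5] at h6
      exact List.mem_of_getElem? h6
    have ht : ∀ x ∈ t, 3 ≤ x ∧ x % 2 = 1 := by
      intro x hx
      refine mem_prB_filter_odd _ x hx ?_
      intro y hy
      rw [PySem.List.mem_pyRange_one] at hy
      omega
    rw [PySem.List.pyRange_one_cons (by omega : (0:Int) < (a.length : Int)), List.flatMap_cons]
    have htail : (PySem.List.pyRange (0 + 1) (a.length : Int) 1).flatMap (fun i =>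
        ((PySem.List.pyRange (i + 1) (a.length : Int) 1).filter
          (fun j => is_prime_A (PySem.List.pyGetD a i 0 + PySem.List.pyGetD a j 0) &&
            is_prime_A |PySem.List.pyGetD a i 0 - PySem.List.pyGetD a j 0|)).map
          (fun j => (PySem.List.pyGetD a i 0, PySem.List.pyGetD a j 0))) = [] := by
      rw [List.flatMap_eq_nil_iff]
      intro i hi
      rw [PySem.List.mem_pyRange_one] at hi
      rw [List.map_eq_nil_iff, List.filter_eq_nil_iff]
      intro j hj
      rw [PySem.List.mem_pyRange_one] at hj
      obtain ⟨hxi3, hxiodd⟩ := ht _ (hgett i (by omega) (by omega))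
      obtain ⟨hxj3, hxjodd⟩ := ht _ (hgett j (by omega) (by omega))
      have hev : prB (PySem.List.pyGetD a i 0 + PySem.List.pyGetD a j 0) = false :=
        prB_even_false _ (by omega) (by omega)
      simp [is_prime_A_eq, hev]
    rw [htail, List.append_nil]
    simp only [hget0, zero_add]
    rw [map_filter_map (fun j => PySem.List.pyGetD a j 0)
      (fun x => is_prime_A (2 + x) && is_prime_A |2 - x|) (fun x => ((2:Int), x))]
    rw [PySem.List.map_pyGetD_pyRange' a 0 (by omega : (0:Int) ≤ (1:Int))]
    have hdrop : a.drop (1:Int).toNat = t := by rw [hcons]; rfl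
    rw [hdrop, htdef, List.filter_filter]
    rw [List.filter_congr (q := G) ?_, filter_G_35]
    · rfl
    · intro x hx
      rw [PySem.List.mem_pyRange_one] at hx
      have habs : |2 - x| = x - 2 := by
        rw [abs_sub_comm]
        exact abs_of_nonneg (by omega)
      simp only [is_prime_A_eq, habs, (by ring : 2 + x = x + 2), G]
      cases prB x <;> cases prB (x - 2) <;> cases prB (x + 2) <;> rfl

lemma G_even_succ (p : Int) (h3 : 3 ≤ p) (hodd : p % 2 = 1) : G (p + 1) = false := by
  have : prB (p + 1) = false := prB_even_false _ (by omega) (by omega)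
  simp [G, this]

lemma alt_go_eq (m : Nat) : ∀ (n p : Int) (res : List (Int × Int)),
    (n + 1 - p).toNat ≤ m → 3 ≤ p → p % 2 = 1 →
    alt_go m n p res = res ++ ((PySem.List.pyRange p (n + 1) 1).filter G).map (fun q => (2, q)) := by
  induction m with
  | zero =>
      intro n p res hm h3 hodd
      rw [alt_go, PySem.List.pyRange_one_eq_nil (by omega)]
      simp
  | succ m ih =>
      intro n p res hm h3 hodd
      rw [alt_go]
      by_cases hle : p ≤ n
      · rw [if_pos hle]
        have hG : (is_prime_B p && is_prime_B (p - 2) && is_prime_B (p + 2)) = G p := by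
          simp [is_prime_B_eq, G]
        rw [hG]
        by_cases hpn : p + 1 ≤ n
        · rw [ih n (p + 2) _ (by omega) (by omega) (by omega)]
          rw [PySem.List.pyRange_one_cons (by omega : p < n + 1),
            PySem.List.pyRange_one_cons (by omega : p + 1 < n + 1)]
          rw [List.filter_cons, List.filter_cons, G_even_succ p h3 hodd]
          rw [(by ring : p + 1 + 1 = p + 2)]
          by_cases hGp : G p = true
          · simp [hGp]
          · simp [hGp]
        · -- p = n: range is [p]
          have hpn' : p = n := by omega
          rw [ih n (p + 2) _ (by omega) (by omega) (by omega)]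
          rw [PySem.List.pyRange_one_eq_nil (a := p + 2) (by omega),
            PySem.List.pyRange_one_cons (by omega : p < n + 1),
            PySem.List.pyRange_one_eq_nil (a := p + 1) (by omega)]
          rw [List.filter_cons]
          by_cases hGp : G p = true
          · simp [hGp]
          · simp [hGp]
      · rw [if_neg hle, PySem.List.pyRange_one_eq_nil (by omega)]
        simp

lemma sum_prime_alt_eq_NF (n : Int) : sum_prime_alt n = NF n := by
  unfold sum_prime_alt NF
  rw [alt_go_eq (n + 1 - 5).toNat n 5 [] (by omega) (by omega) (by omega)]
  simp

-- ===== VERDICT (by name: the statement is the Claim_ definition above) =====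
theorem sum_prime_spec : Claim_equal_sum_prime := by
  intro n _
  unfold Spec_sum_prime
  rw [sum_prime_eq_NF, sum_prime_alt_eq_NF]
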